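-- pv_equiv track=rewrite | github.com/hyeinisfree/kings-algorithm-study | seungmi/week13/방의개수.py | solution
-- ===== SOURCE A (Python) =====
-- import collections
--
-- def solution(arrows):
--     answer = 0
--     move=[(-1,0),(-1,1),(0,1),(1,1),(1,0),(1,-1),(0,-1),(-1,-1)]
--     now=(0,0)
--
--     #방문노드
--     visited=collections.defaultdict(bool)
--     #방문간선
--     visited_edge=collections.defaultdict(int)
--
--     q=collections.deque([now])
--     for i in arrows:
--         for _ in range(2):
--             next=(now[0]+move[i][0],now[1]+move[i][1])
--             q.append(next)
--             now=next
--
--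
--     now= q.popleft()
--     visited[now]=1
--
--     while q:
--         next=q.popleft()
--         if visited[next]:
--             if visited_edge[(now,next)]==0:
--                 answer+=1
--         else:
--             visited[next]=True
--
--         visited_edge[(now,next)]=1
--         visited_edge[(next,now)]=1
--         now=next
--
--     return answer
-- ===== SOURCE B (Python) =====
-- def _step(visited, edges, now, nxt, answer):
--     # process one unit move of the path: count a new room iff we revisit a
--     # node over a never-used edge; then mark node and both edge directions
--     if nxt in visited:
--         if (now, nxt) not in edges:
--             answer += 1
--     else:
--         visited.add(nxt)
--     edges.add((now, nxt))
--     edges.add((nxt, now))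
--     return answer
--
-- def solution(arrows):
--     move = [(-1,0),(-1,1),(0,1),(1,1),(1,0),(1,-1),(0,-1),(-1,-1)]
--     now = (0, 0)
--     visited = {now}
--     edges = set()
--     answer = 0
--     for i in arrows:
--         dx, dy = move[i]
--         for _ in range(2):
--             nxt = (now[0] + dx, now[1] + dy)
--             answer = _step(visited, edges, now, nxt, answer)
--             now = nxt
--     return answer
-- ===== Notes on version B (the rewrite author's own statement) =====
-- stated objective: simpler
-- what changed: B drops the deque and the separate path-building pass: it fuses building and counting into one loop over the arrows, keeping visited nodes and used edges in sets instead of defaultdicts.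
import Mathlib
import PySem

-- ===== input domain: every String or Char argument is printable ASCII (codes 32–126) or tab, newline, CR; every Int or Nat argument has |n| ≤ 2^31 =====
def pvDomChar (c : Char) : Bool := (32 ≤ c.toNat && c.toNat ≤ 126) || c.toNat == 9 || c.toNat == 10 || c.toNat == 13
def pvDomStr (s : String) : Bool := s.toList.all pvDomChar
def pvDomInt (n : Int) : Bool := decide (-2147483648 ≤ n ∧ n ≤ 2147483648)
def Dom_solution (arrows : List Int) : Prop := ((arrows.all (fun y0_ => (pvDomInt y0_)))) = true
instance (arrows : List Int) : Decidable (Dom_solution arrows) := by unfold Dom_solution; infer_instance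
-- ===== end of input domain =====

-- B drops the deque / separate path-building pass of A and fuses building and counting
-- into one loop over the arrows, with sets instead of defaultdicts (objective: simpler).

-- ===== PORT A =====
def solMove : List (Int × Int) := [(-1,0),(-1,1),(0,1),(1,1),(1,0),(1,-1),(0,-1),(-1,-1)]

-- the two path-building appends per arrow ('for _ in range(2)'); returns (appended points, final now)
def buildSteps : List Int → (Int × Int) → List (Int × Int) × (Int × Int)
  | [], now => ([], now)
  | i :: rest, now =>
    let d := (PySem.List.pyGet? solMove i).getD (0, 0)   -- move[i]; default unreachable under Pre_
    let n1 := (now.1 + d.1, now.2 + d.2)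
    let n2 := (n1.1 + d.1, n1.2 + d.2)
    let r := buildSteps rest n2
    (n1 :: n2 :: r.1, r.2)

-- A's 'while q' counting loop over the popped points
def countLoop : List (Int × Int) → PySem.Dict (Int × Int) Bool →
    PySem.Dict ((Int × Int) × (Int × Int)) Int → (Int × Int) → Int → Int
  | [], _, _, _, ans => ans
  | nxt :: q, v, e, now, ans =>
    let ans' := if v.getD nxt false then (if e.getD (now, nxt) 0 = 0 then ans + 1 else ans) else ans
    let v' := if v.getD nxt false then v else v.insert nxt true
    countLoop q v' ((e.insert (now, nxt) 1).insert (nxt, now) 1) nxt ans'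

def solution (arrows : List Int) : Int :=
  countLoop (buildSteps arrows (0, 0)).1 (PySem.Dict.empty.insert (0, 0) true)
    PySem.Dict.empty (0, 0) 0

-- ===== PORT B =====
-- Source B's _step: process one unit move, returning (visited, edges, answer)
def stepB (v : PySem.Set (Int × Int)) (e : PySem.Set ((Int × Int) × (Int × Int)))
    (now nxt : Int × Int) (ans : Int) :
    PySem.Set (Int × Int) × PySem.Set ((Int × Int) × (Int × Int)) × Int :=
  let ans' := if PySem.Set.contains v nxt then
      (if PySem.Set.contains e (now, nxt) then ans else ans + 1) else ans
  let v' := if PySem.Set.contains v nxt then v else PySem.Set.add v nxt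
  (v', PySem.Set.add (PySem.Set.add e (now, nxt)) (nxt, now), ans')

def loopB : List Int → PySem.Set (Int × Int) → PySem.Set ((Int × Int) × (Int × Int)) →
    (Int × Int) → Int → Int
  | [], _, _, _, ans => ans
  | i :: rest, v, e, now, ans =>
    let d := (PySem.List.pyGet? solMove i).getD (0, 0)
    let n1 := (now.1 + d.1, now.2 + d.2)
    let s1 := stepB v e now n1 ans
    let n2 := (n1.1 + d.1, n1.2 + d.2)
    let s2 := stepB s1.1 s1.2.1 n1 n2 s1.2.2
    loopB rest s2.1 s2.2.1 n2 s2.2.2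

def solution_alt (arrows : List Int) : Int :=
  loopB arrows (PySem.Set.add PySem.Set.empty (0, 0)) PySem.Set.empty (0, 0) 0

-- ===== PRECONDITION & SPEC =====
-- Pre_ excludes exactly the arrow values outside -8..7, on which Python's move[i] raises IndexError.
def Pre_solution (arrows : List Int) : Prop := ∀ i ∈ arrows, -8 ≤ i ∧ i < 8
instance (arrows : List Int) : Decidable (Pre_solution arrows) := by unfold Pre_solution; infer_instance
def pvWitness_solution : List Int := [6, 6, 6, 4, 4, 4, 2, 2, 2, 0, 0, 0]

def Spec_solution (arrows : List Int) (out : Int) : Prop := out = solution_alt arrows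
instance (arrows : List Int) (out : Int) : Decidable (Spec_solution arrows out) := by unfold Spec_solution; infer_instance

-- ===== CLAIM (what is proved, stated in full; the proofs are below) =====
def Claim_equal_solution : Prop := ∀ (arrows : List Int), Dom_solution arrows → Pre_solution arrows → Spec_solution arrows (solution arrows)

-- ===== LEMMAS AND PROOFS =====

-- proof-side: B's per-point step folded over an already-built list of points
def countB : List (Int × Int) → PySem.Set (Int × Int) →
    PySem.Set ((Int × Int) × (Int × Int)) → (Int × Int) → Int → Int
  | [], _, _, _, ans => ans
  | nxt :: q, v, e, now, ans =>
    let s := stepB v e now nxt ans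
    countB q s.1 s.2.1 nxt s.2.2

-- state correspondence between A's defaultdicts and B's sets
def StInv (vd : PySem.Dict (Int × Int) Bool) (ed : PySem.Dict ((Int × Int) × (Int × Int)) Int)
    (vs : PySem.Set (Int × Int)) (es : PySem.Set ((Int × Int) × (Int × Int))) : Prop :=
  (∀ p, vd.getD p false = decide (p ∈ vs)) ∧
  (∀ q, (ed.getD q 0 = 0) ↔ q ∉ es)

lemma inv_step (vd : PySem.Dict (Int × Int) Bool) (ed : PySem.Dict ((Int × Int) × (Int × Int)) Int)
    (vs : PySem.Set (Int × Int)) (es : PySem.Set ((Int × Int) × (Int × Int)))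
    (now nxt : Int × Int) (ans : Int) (h : StInv vd ed vs es) :
    StInv (if vd.getD nxt false then vd else vd.insert nxt true)
        ((ed.insert (now, nxt) 1).insert (nxt, now) 1)
        (stepB vs es now nxt ans).1 (stepB vs es now nxt ans).2.1 ∧
    (if vd.getD nxt false then (if ed.getD (now, nxt) 0 = 0 then ans + 1 else ans) else ans)
      = (stepB vs es now nxt ans).2.2 := by
  obtain ⟨hv, he⟩ := h
  refine ⟨⟨?_, ?_⟩, ?_⟩
  · intro p
    by_cases hvis : nxt ∈ vs
    · simp [stepB, PySem.Set.contains, hvis, hv]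
    · simp only [stepB, PySem.Set.contains, hv, hvis, decide_false, Bool.false_eq_true,
        if_false, List.elem_eq_contains, List.contains_eq_mem]
      rw [PySem.Dict.getD_insert]
      by_cases hp : p = nxt
      · simp [hp, hvis, PySem.Set.mem_add]
      · simp [hp, hv]
  · intro q
    simp only [stepB]
    rw [PySem.Dict.getD_insert, PySem.Dict.getD_insert]
    by_cases h1 : q = (nxt, now)
    · simp [h1, PySem.Set.mem_add]
    · by_cases h2 : q = (now, nxt)
      · simp [h2, PySem.Set.mem_add]
      · simp [h1, h2, PySem.Set.mem_add, he]
  · by_cases hvis : nxt ∈ vs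
    · by_cases hed : ed.getD (now, nxt) 0 = 0
      · have hne : (now, nxt) ∉ es := (he _).mp hed
        simp [stepB, PySem.Set.contains, hvis, hed, hne, hv]
      · have hmem : (now, nxt) ∈ es := by
          by_contra hc; exact hed ((he _).mpr hc)
        simp [stepB, PySem.Set.contains, hvis, hed, hmem, hv]
    · simp [stepB, PySem.Set.contains, hvis, hv]

lemma count_eq (points : List (Int × Int)) :
    ∀ vd ed vs es now ans, StInv vd ed vs es →
      countLoop points vd ed now ans = countB points vs es now ans := by
  induction points with
  | nil => intro _ _ _ _ _ _ _; rfl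
  | cons nxt q ih =>
    intro vd ed vs es now ans h
    obtain ⟨hinv, hans⟩ := inv_step vd ed vs es now nxt ans h
    simp only [countLoop, countB]
    rw [hans]
    exact ih _ _ _ _ _ _ hinv

lemma loopB_eq_countB (arrows : List Int) :
    ∀ vs es now ans, loopB arrows vs es now ans =
      countB (buildSteps arrows now).1 vs es now ans := by
  induction arrows with
  | nil => intro _ _ _ _; rfl
  | cons i rest ih =>
    intro vs es now ans
    simp only [loopB, buildSteps, countB]
    exact ih _ _ _ _

lemma inv_init : StInv (PySem.Dict.empty.insert (0, 0) true) PySem.Dict.empty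
    (PySem.Set.add PySem.Set.empty (0, 0)) PySem.Set.empty := by
  constructor
  · intro p
    rw [PySem.Dict.getD_insert]
    by_cases hp : p = ((0, 0) : Int × Int) <;>
      simp [hp, PySem.Dict.getD_empty, PySem.Set.empty]
  · intro q
    simp [PySem.Dict.getD_empty, PySem.Set.empty]

-- ===== VERDICT (by name: the statement is the Claim_ definition above) =====
theorem solution_spec : Claim_equal_solution := by
  intro arrows _ _
  show solution arrows = solution_alt arrows
  unfold solution solution_alt
  rw [loopB_eq_countB]
  exact count_eq _ _ _ _ _ _ _ inv_init
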